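-- pv_equiv track=rewrite | github.com/leroy42jenkins/sir-compiler-0 | lib/grammar.py | isUnescapedEnd
-- ===== SOURCE A (Python) =====
-- def isUnescapedEnd(source, i, c):
--     if source[i] != c:
--         return False
--
--     i -= 1
--     count = 0
--     while (i >= 0 and source[i] == '\\'):
--         i -= 1
--         count += 1
--
--     return count % 2 == 0
-- ===== SOURCE B (Python) =====
-- def isUnescapedEnd(source, i, c):
--     if source[i] != c:
--         return False
--     if i <= 0:
--         return True
--     prefix = source[:i]
--     return (len(prefix) - len(prefix.rstrip('\\'))) % 2 == 0
-- ===== Notes on version B (the rewrite author's own statement) =====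
-- stated objective: simpler
-- what changed: Replaces the manual backward while-loop over preceding characters by slicing the prefix and measuring the trailing backslash run as len(prefix) - len(prefix.rstrip('\\')).
import Mathlib
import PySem

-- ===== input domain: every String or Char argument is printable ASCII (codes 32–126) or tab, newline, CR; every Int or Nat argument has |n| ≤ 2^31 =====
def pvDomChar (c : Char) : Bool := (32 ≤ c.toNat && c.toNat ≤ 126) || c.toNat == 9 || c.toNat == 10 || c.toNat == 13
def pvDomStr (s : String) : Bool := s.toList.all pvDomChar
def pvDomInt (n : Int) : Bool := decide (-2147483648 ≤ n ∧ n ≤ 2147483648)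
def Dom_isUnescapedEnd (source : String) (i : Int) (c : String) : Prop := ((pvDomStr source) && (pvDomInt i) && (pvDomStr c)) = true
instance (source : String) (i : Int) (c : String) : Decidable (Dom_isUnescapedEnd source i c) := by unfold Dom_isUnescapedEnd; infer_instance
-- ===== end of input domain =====

-- B measures the trailing backslash run of source[:i] with rstrip instead of A's backward loop; one honest line: simpler decomposition, same values.

-- ===== PORT A =====
-- the while-loop 'while i >= 0 and source[i] == '\\': i -= 1; count += 1'
def pvCountBack (cs : List Char) (i : Int) (count : Nat) : Nat :=
  if h : 0 ≤ i ∧ PySem.List.pyGet? cs i = some '\\' then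
    pvCountBack cs (i - 1) (count + 1)
  else count
termination_by (i + 1).toNat
decreasing_by omega

def isUnescapedEnd (source : String) (i : Int) (c : String) : Bool :=
  match PySem.List.pyGet? source.toList i with
  | none => false  -- IndexError: excluded by Pre_
  | some ch =>
    if (String.mk [ch]) ≠ c then false
    else pvCountBack source.toList (i - 1) 0 % 2 == 0

-- ===== PORT B =====
-- hand port of prefix.rstrip('\\') (strip only the single character '\\'): exact on all inputs
def pvRstripBS (l : List Char) : List Char := (l.reverse.dropWhile (· == '\\')).reverse

def isUnescapedEnd_alt (source : String) (i : Int) (c : String) : Bool :=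
  match PySem.List.pyGet? source.toList i with
  | none => false  -- IndexError: excluded by Pre_
  | some ch =>
    if (String.mk [ch]) ≠ c then false
    else if i ≤ 0 then true
    else
      let p := PySem.List.slice source.toList none (some i)
      (p.length - (pvRstripBS p).length) % 2 == 0

-- ===== PRECONDITION & SPEC =====
-- A raises IndexError exactly when i is not a valid Python index into source
def Pre_isUnescapedEnd (source : String) (i : Int) (c : String) : Prop :=
  PySem.Raise.InRange source.toList.length i
instance (source : String) (i : Int) (c : String) : Decidable (Pre_isUnescapedEnd source i c) := by
  unfold Pre_isUnescapedEnd; infer_instance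

def pvWitness_isUnescapedEnd : String × Int × String := ("a\\\"", 2, "\"")

def Spec_isUnescapedEnd (source : String) (i : Int) (c : String) (out : Bool) : Prop := out = isUnescapedEnd_alt source i c
instance (source : String) (i : Int) (c : String) (out : Bool) : Decidable (Spec_isUnescapedEnd source i c out) := by unfold Spec_isUnescapedEnd; infer_instance

-- ===== CLAIM (what is proved, stated in full; the proofs are below) =====
def Claim_equal_isUnescapedEnd : Prop := ∀ (source : String) (i : Int) (c : String), Dom_isUnescapedEnd source i c → Pre_isUnescapedEnd source i c → Spec_isUnescapedEnd source i c (isUnescapedEnd source i c)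

-- ===== LEMMAS AND PROOFS =====

lemma pvCountBack_neg (cs : List Char) (i : Int) (count : Nat) (h : i < 0) :
    pvCountBack cs i count = count := by
  rw [pvCountBack]; simp [show ¬ (0 ≤ i) by omega]

lemma pvCountBack_eq (cs : List Char) : ∀ (j : Nat) (acc : Nat), j ≤ cs.length →
    pvCountBack cs ((j : Int) - 1) acc
      = acc + ((cs.take j).reverse.takeWhile (· == '\\')).length := by
  intro j
  induction j with
  | zero => intro acc _; simp [pvCountBack_neg cs (-1) acc (by omega)]
  | succ n ih =>
    intro acc hle
    have hn : n < cs.length := by omega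
    have hcast : (((n + 1 : Nat) : Int)) - 1 = (n : Int) := by push_cast; ring
    rw [hcast, pvCountBack]
    have hget : PySem.List.pyGet? cs (n : Int) = some cs[n] := by
      simp [List.getElem?_eq_getElem hn]
    have htake : (cs.take (n + 1)).reverse = cs[n] :: (cs.take n).reverse := by
      rw [List.take_add_one]
      simp [List.getElem?_eq_getElem hn]
    by_cases hc : cs[n] = '\\'
    · rw [dif_pos ⟨by omega, by rw [hget, hc]⟩, ih (acc + 1) (by omega), htake]
      simp [List.takeWhile, hc]
      omega
    · have hne : ¬ (0 ≤ (n : Int) ∧ PySem.List.pyGet? cs (n : Int) = some '\\') := by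
        rintro ⟨-, h2⟩
        rw [hget] at h2
        exact hc (Option.some.injEq _ _ ▸ h2)
      rw [dif_neg hne, htake]
      simp [hc]

lemma pvRstripBS_len (l : List Char) :
    l.length - (pvRstripBS l).length = (l.reverse.takeWhile (· == '\\')).length := by
  have h2 := congrArg List.length
    (List.takeWhile_append_dropWhile (p := (· == '\\')) (l := l.reverse))
  simp only [List.length_append, List.length_reverse] at h2
  unfold pvRstripBS
  simp only [List.length_reverse]
  omega

-- ===== VERDICT (by name: the statement is the Claim_ definition above) =====
theorem isUnescapedEnd_spec : Claim_equal_isUnescapedEnd := by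
  intro source i c _hdom hpre
  unfold Spec_isUnescapedEnd isUnescapedEnd isUnescapedEnd_alt
  cases hget : PySem.List.pyGet? source.toList i with
  | none => rfl
  | some ch =>
    by_cases hc : (String.mk [ch]) ≠ c
    · simp [hc]
    · simp only [hc, if_false]
      by_cases hi : i ≤ 0
      · simp [hi, pvCountBack_neg source.toList (i - 1) 0 (by omega)]
      · simp only [hi]
        have hipos : 0 < i := by omega
        have hlt : i < (source.toList.length : Int) := by
          unfold Pre_isUnescapedEnd PySem.Raise.InRange at hpre
          omega
        have hjle : i.toNat ≤ source.toList.length := by omega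
        have hslice : PySem.List.slice source.toList none (some i) = source.toList.take i.toNat := by
          rw [PySem.List.slice_to] ; omega
        simp only [hslice, ite_false]
        rw [show i - 1 = ((i.toNat : Nat) : Int) - 1 by omega,
            pvCountBack_eq source.toList i.toNat 0 hjle, pvRstripBS_len]
        simp
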